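-- pv_equiv track=rewrite | github.com/pessman/coding_chalenges | subsets_that_add_to_n/subsets_that_add_to_n.py | subsets_that_add_to_n
-- ===== SOURCE A (Python) =====
-- def subsets_that_add_to_n(int_list, target):
--     if not isinstance(int_list, list):
--         raise TypeError("int_list parameter must be of type list")
--     if any([isinstance(integer, int) is False for integer in int_list]):
--         raise TypeError("all items in int_list parameter must be of type int")
--     if not isinstance(target, int):
--         raise TypeError("integer parameter must be of type int")
--
--     if target == 0:
--         return [[]]
--     subsets = []
--     for index, integer in enumerate(int_list):
--         if target - integer > 0:
--             subs = subsets_that_add_to_n(int_list[index + 1:], target - integer)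
--             for sub in subs:
--                 integer_list = [integer]
--                 subsets.append([*integer_list, *sub])
--         elif target - integer == 0:
--             subsets.append([integer])
--
--     return subsets
-- ===== SOURCE B (Python) =====
-- def subsets_that_add_to_n(int_list, target):
--     # Backtracking DFS over indices: no per-call list slicing, no per-level
--     # re-copying of result sublists; shared mutable prefix with push/pop,
--     # each found subset copied exactly once into the output accumulator.
--     if target == 0:
--         return [[]]
--     n = len(int_list)
--     out = []
--     prefix = []
--
--     def dfs(i, remaining):
--         for j in range(i, n):
--             x = int_list[j]
--             r = remaining - x
--             if r > 0:
--                 prefix.append(x)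
--                 dfs(j + 1, r)
--                 prefix.pop()
--             elif r == 0:
--                 out.append(prefix + [x])
--
--     dfs(0, target)
--     return out
-- ===== Notes on version B (the rewrite author's own statement) =====
-- stated objective: alternative
-- what changed: Replaces A's slice-and-remap recursion (slicing the list and re-copying every result sublist at each recursion level) by an index-based backtracking DFS with a shared push/pop prefix and a single output accumulator, copying each found subset exactly once.
import Mathlib
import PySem

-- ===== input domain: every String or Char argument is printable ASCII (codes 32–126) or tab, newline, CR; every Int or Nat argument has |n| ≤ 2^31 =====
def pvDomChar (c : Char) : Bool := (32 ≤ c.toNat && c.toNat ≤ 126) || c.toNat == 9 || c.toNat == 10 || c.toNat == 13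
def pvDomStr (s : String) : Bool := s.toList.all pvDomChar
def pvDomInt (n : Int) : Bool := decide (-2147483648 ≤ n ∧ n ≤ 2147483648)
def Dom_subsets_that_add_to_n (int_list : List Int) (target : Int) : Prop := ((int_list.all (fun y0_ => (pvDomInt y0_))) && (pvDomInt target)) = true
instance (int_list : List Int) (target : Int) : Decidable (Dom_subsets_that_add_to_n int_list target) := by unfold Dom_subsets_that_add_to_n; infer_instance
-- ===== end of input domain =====

-- B replaces A's slice-and-remap recursion by an index-based backtracking DFS with a
-- shared pre and one output accumulator (constant-factor change; equivalence of the
-- RETURN values is what is proved).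

-- ===== PORT A =====
-- The for-loop over enumerate(int_list) is ported as structural recursion over the list:
-- at index `index` the slice int_list[index+1:] is exactly the structural tail `xs`, so the
-- suffix is carried structurally instead of re-sliced.  `subsetsCall` is the recursive call
-- to the full function (whose `target == 0` branch is re-checked, as in the Python).
mutual
  def subsetsCall (int_list : List Int) (target : Int) : List (List Int) :=
    if target = 0 then [[]]
    else subsetsLoop int_list target
  termination_by 2 * int_list.length + 2

  -- the body of the for-loop, element by element, appending to `subsets` in loop order
  def subsetsLoop (int_list : List Int) (target : Int) : List (List Int) :=
    match int_list with
    | [] => []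
    | integer :: rest =>
        (if target - integer > 0 then
          (subsetsCall rest (target - integer)).map (fun sub => integer :: sub)
        else if target - integer = 0 then [[integer]]
        else []) ++ subsetsLoop rest target
  termination_by 2 * int_list.length + 1
  decreasing_by all_goals (simp [List.length_cons]; try omega)
end

def subsets_that_add_to_n (int_list : List Int) (target : Int) : List (List Int) :=
  subsetsCall int_list target

-- ===== PORT B =====
-- dfs(i, remaining): the Python's for-loop over j in range(i, n) becomes recursion on j;
-- the mutable pre push/pop is ported by passing `pre ++ [x]` down, and `out` is the
-- output accumulator the Python appends to.
def altDfs (int_list : List Int) (j : Nat) (remaining : Int) (pre : List Int)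
    (out : List (List Int)) : List (List Int) :=
  if h : j < int_list.length then
    let x := int_list[j]
    let r := remaining - x
    let out' :=
      if r > 0 then altDfs int_list (j + 1) r (pre ++ [x]) out
      else if r = 0 then out ++ [pre ++ [x]]
      else out
    altDfs int_list (j + 1) remaining pre out'
  else out
termination_by int_list.length - j
decreasing_by all_goals omega

def subsets_that_add_to_n_alt (int_list : List Int) (target : Int) : List (List Int) :=
  if target = 0 then [[]]
  else altDfs int_list 0 target [] []

-- ===== PRECONDITION & SPEC =====
def Spec_subsets_that_add_to_n (int_list : List Int) (target : Int) (out : List (List Int)) : Prop := out = subsets_that_add_to_n_alt int_list target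
instance (int_list : List Int) (target : Int) (out : List (List Int)) : Decidable (Spec_subsets_that_add_to_n int_list target out) := by unfold Spec_subsets_that_add_to_n; infer_instance

-- ===== CLAIM (what is proved, stated in full; the proofs are below) =====
def Claim_equal_subsets_that_add_to_n : Prop := ∀ (int_list : List Int) (target : Int), Dom_subsets_that_add_to_n int_list target → Spec_subsets_that_add_to_n int_list target (subsets_that_add_to_n int_list target)

-- ===== LEMMAS AND PROOFS =====

-- the accumulator invariant: altDfs starting at j computes exactly A's loop over the suffix,
-- each subset prefixed by `pre`, appended after `out`
theorem altDfs_eq (int_list : List Int) : ∀ (j : Nat) (remaining : Int)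
    (pre : List Int) (out : List (List Int)),
    altDfs int_list j remaining pre out
      = out ++ (subsetsLoop (int_list.drop j) remaining).map (fun s => pre ++ s) := by
  intro j
  induction hk : int_list.length - j using Nat.strong_induction_on generalizing j with
  | _ k ih =>
    intro remaining pre out
    rw [altDfs]
    by_cases h : j < int_list.length
    · simp only [dif_pos h]
      have hdrop : int_list.drop j = int_list[j] :: int_list.drop (j + 1) :=
        List.drop_eq_getElem_cons h
      have hlt : int_list.length - (j + 1) < k := by omega
      rw [ih _ hlt (j + 1) rfl, hdrop, subsetsLoop]
      set x := int_list[j] with hx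
      by_cases h1 : remaining - x > 0
      · have hne : remaining - x ≠ 0 := by omega
        rw [if_pos h1, ih _ hlt (j + 1) rfl, if_pos h1, subsetsCall, if_neg hne]
        simp [List.map_map, Function.comp_def, List.append_assoc]
      · rw [if_neg h1]
        by_cases h2 : remaining - x = 0
        · simp [h2, List.append_assoc]
        · have h1' : ¬ x < remaining := by omega
          simp [h1', h2]
    · simp only [dif_neg h]
      have : int_list.drop j = [] := List.drop_eq_nil_of_le (by omega)
      simp [this, subsetsLoop]

theorem subsets_that_add_to_n_spec : Claim_equal_subsets_that_add_to_n := by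
  intro int_list target _
  unfold Spec_subsets_that_add_to_n subsets_that_add_to_n subsets_that_add_to_n_alt subsetsCall
  by_cases ht : target = 0
  · simp [ht]
  · rw [if_neg ht, if_neg ht, altDfs_eq]
    simp
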